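-- pv_equiv track=rewrite | github.com/seungminleeee/AlgoStudy | yyong/2025.01/250125_이모티콘_할인행사.py | solution
-- ===== SOURCE A (Python) =====
-- def solution(users, emoticons):
--     n = len(users)
--     m = len(emoticons)
--     sale = [10 for _ in range(m)]
--     answer = [0, 0]
--
--     def dfs(i):  # 할인율 정한 수
--
--         if i == m:
--
--             total_amount = 0
--             cnt = 0
--
--             # 유저 한명씩 가격 계산
--             for user in users:
--                 amount = 0
--                 # 이모티콘 구매 가격
--                 for s in range(m):
--                     if sale[s] >= user[0]:
--                         amount += emoticons[s] * (100 - sale[s]) // 100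
--                 # 이모티콘 플러스 결제할지말지
--                 if amount >= user[1]:  # 구매
--                     amount = 0
--                     cnt += 1
--
--                 else:  # 구매안함
--                     total_amount += amount
--
--             # 정답 갱신
--             if cnt > answer[0]:
--
--                 answer[0] = cnt
--                 answer[1] = total_amount
--
--             elif cnt == answer[0]:
--                 if total_amount > answer[1]:
--                     answer[1] = total_amount
--
--             return
--
--         # 이모티콘 하나씩 갱신
--         for j in [10, 20, 30, 40]:
--             cur = sale[i]
--
--             sale[i] = j
--             dfs(i + 1)
--             sale[i] = cur
--
--     dfs(0)
--
--     return answer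
-- ===== SOURCE B (Python) =====
-- from itertools import product
--
-- def solution(users, emoticons):
--     best_cnt, best_total = 0, 0
--     for combo in product((10, 20, 30, 40), repeat=len(emoticons)):
--         cnt = 0
--         total = 0
--         for user in users:
--             amount = sum(price * (100 - disc) // 100
--                          for price, disc in zip(emoticons, combo)
--                          if disc >= user[0])
--             if amount >= user[1]:
--                 cnt += 1
--             else:
--                 total += amount
--         if cnt > best_cnt or (cnt == best_cnt and total > best_total):
--             best_cnt, best_total = cnt, total
--     return [best_cnt, best_total]
-- ===== Notes on version B (the rewrite author's own statement) =====
-- stated objective: idiomatic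
-- what changed: Replaces the recursive dfs over a mutable sale array and a mutated answer list by a flat iteration over itertools.product((10,20,30,40), repeat=m) with a zip-based per-user amount and an immutable best-(cnt,total) accumulator.
-- outside the precondition, e.g. on solution([[10]], [100]): A raises IndexError, B raises IndexError
import Mathlib
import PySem

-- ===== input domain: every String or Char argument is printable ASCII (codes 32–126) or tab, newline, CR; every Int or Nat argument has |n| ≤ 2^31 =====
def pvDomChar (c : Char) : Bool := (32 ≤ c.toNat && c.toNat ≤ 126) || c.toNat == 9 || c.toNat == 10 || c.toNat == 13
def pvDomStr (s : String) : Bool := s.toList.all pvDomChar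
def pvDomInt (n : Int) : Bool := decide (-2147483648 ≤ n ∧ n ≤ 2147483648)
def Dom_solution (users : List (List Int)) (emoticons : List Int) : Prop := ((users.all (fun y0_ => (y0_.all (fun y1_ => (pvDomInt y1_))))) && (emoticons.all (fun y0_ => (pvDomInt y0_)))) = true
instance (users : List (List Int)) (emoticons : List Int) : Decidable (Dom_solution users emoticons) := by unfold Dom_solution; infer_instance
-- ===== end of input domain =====

-- B replaces A's recursive dfs over a mutable `sale` array by a flat enumeration of
-- all 4^m discount combinations (itertools.product) with a per-combination fold
-- (objective: idiomatic; same asymptotic cost; return value only — neither mutates its arguments).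

-- ===== PORT A =====
-- answer [cnt, total] is carried as an Int × Int pair; dfs's `i` is carried as the
-- remaining depth k = m - i (so i == m is k == 0), which makes the recursion structural.
def updA (ans ct : Int × Int) : Int × Int :=
  if ct.1 > ans.1 then (ct.1, ct.2)
  else if ct.1 = ans.1 then (if ct.2 > ans.2 then (ans.1, ct.2) else ans)
  else ans

-- the leaf of dfs: one pass over users with the inner `for s in range(m)` price loop
def leafA (users : List (List Int)) (emoticons : List Int) (m : Nat) (sale : List Int) : Int × Int :=
  users.foldl (fun acc user =>
    let amount := (PySem.List.pyRange 0 (m : Int) 1).foldl (fun amt s =>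
        if PySem.List.pyGetD sale s 0 ≥ PySem.List.pyGetD user 0 0
        then amt + PySem.Int.floordiv (PySem.List.pyGetD emoticons s 0 * (100 - PySem.List.pyGetD sale s 0)) 100
        else amt) 0
    if amount ≥ PySem.List.pyGetD user 1 0 then (acc.1 + 1, acc.2)
    else (acc.1, acc.2 + amount)) (0, 0)

def dfsA (users : List (List Int)) (emoticons : List Int) (m : Nat) :
    Nat → List Int → Int × Int → Int × Int
  | 0, sale, ans => updA ans (leafA users emoticons m sale)
  | k + 1, sale, ans =>
      ([10, 20, 30, 40] : List Int).foldl
        (fun a j => dfsA users emoticons m k (PySem.List.pySetD sale ((m - (k + 1) : Nat) : Int) j) a) ans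

def solution (users : List (List Int)) (emoticons : List Int) : List Int :=
  let m := emoticons.length
  let ans := dfsA users emoticons m m (List.replicate m (10 : Int)) (0, 0)
  [ans.1, ans.2]

-- ===== PORT B =====
-- itertools.product([10,20,30,40], repeat=k), in product order (leftmost slot slowest)
def combosB : Nat → List (List Int)
  | 0 => [[]]
  | k + 1 => ([10, 20, 30, 40] : List Int).flatMap (fun j => (combosB k).map (fun c => j :: c))

-- cnt/total for one combination; amount is sum(... for price,disc in zip(...) if disc >= user[0])
def scoreB (users : List (List Int)) (emoticons : List Int) (combo : List Int) : Int × Int :=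
  users.foldl (fun acc user =>
    let amount := (((emoticons.zip combo).filter (fun p => p.2 ≥ PySem.List.pyGetD user 0 0)).map
        (fun p => PySem.Int.floordiv (p.1 * (100 - p.2)) 100)).sum
    if amount ≥ PySem.List.pyGetD user 1 0 then (acc.1 + 1, acc.2)
    else (acc.1, acc.2 + amount)) (0, 0)

def solution_alt (users : List (List Int)) (emoticons : List Int) : List Int :=
  let best := (combosB emoticons.length).foldl (fun b c =>
      let sc := scoreB users emoticons c
      if sc.1 > b.1 ∨ (sc.1 = b.1 ∧ sc.2 > b.2) then sc else b) (0, 0)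
  [best.1, best.2]

-- ===== PRECONDITION & SPEC =====
-- A indexes user[0] and user[1] for every user, so it raises IndexError iff some user
-- has fewer than two entries; exactly those inputs are excluded (B raises there too).
def Pre_solution (users : List (List Int)) (emoticons : List Int) : Prop :=
  ∀ u ∈ users, 2 ≤ u.length
instance (users : List (List Int)) (emoticons : List Int) : Decidable (Pre_solution users emoticons) := by
  unfold Pre_solution; infer_instance
def pvWitness_solution : List (List Int) × List Int := ([[40, 100], [10, 5]], [100, 50])

def Spec_solution (users : List (List Int)) (emoticons : List Int) (out : List Int) : Prop := out = solution_alt users emoticons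
instance (users : List (List Int)) (emoticons : List Int) (out : List Int) : Decidable (Spec_solution users emoticons out) := by unfold Spec_solution; infer_instance

-- ===== CLAIM (what is proved, stated in full; the proofs are below) =====
def Claim_equal_solution : Prop := ∀ (users : List (List Int)) (emoticons : List Int), Dom_solution users emoticons → Pre_solution users emoticons → Spec_solution users emoticons (solution users emoticons)

-- ===== LEMMAS AND PROOFS =====

-- A's answer update = B's single-condition update
theorem updA_eq (ans sc : Int × Int) :
    updA ans sc = if sc.1 > ans.1 ∨ (sc.1 = ans.1 ∧ sc.2 > ans.2) then sc else ans := by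
  unfold updA
  split_ifs with h1 h2 h3 h4 h5 h6 h7 <;> try rfl
  all_goals first
  | (exact Prod.ext (by omega) rfl)
  | omega

-- foldl over a flatMap = nested foldl
theorem foldl_flatMap' {α β γ : Type} (l : List α) (g : α → List β) (f : γ → β → γ) (a : γ) :
    (l.flatMap g).foldl f a = l.foldl (fun a x => (g x).foldl f a) a := by
  induction l generalizing a with
  | nil => rfl
  | cons x xs ih => simp [List.flatMap_cons, List.foldl_append, ih]

-- conditional accumulation = sum over the filtered, mapped list
theorem foldl_if_add_eq_sum {α : Type} (xs : List α) (P : α → Prop) [DecidablePred P] (g : α → Int) (a : Int) :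
    xs.foldl (fun amt p => if P p then amt + g p else amt) a
      = a + ((xs.filter (fun p => decide (P p))).map g).sum := by
  induction xs generalizing a with
  | nil => simp
  | cons x xs ih =>
      by_cases h : P x <;> simp [h, ih, add_assoc]

-- xs.zip ys indexed componentwise
theorem pyGetD_zip (es ds : List Int) (s : Int) (h0 : 0 ≤ s) (h1 : s < (es.length : Int))
    (h2 : s < (ds.length : Int)) :
    PySem.List.pyGetD (es.zip ds) s ((0 : Int), (0 : Int))
      = (PySem.List.pyGetD es s 0, PySem.List.pyGetD ds s 0) := by
  have hs : s = (s.toNat : Int) := by omega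
  rw [hs]
  simp only [PySem.List.pyGetD_natCast]
  rw [List.getD_eq_getElem _ _ (by simp; omega), List.getD_eq_getElem _ _ (by omega),
    List.getD_eq_getElem _ _ (by omega), List.getElem_zip]

-- the indexed inner loop of A = the zip-based amount of B
theorem inner_eq (es ds : List Int) (hlen : ds.length = es.length) (u0 a : Int) :
    (PySem.List.pyRange 0 (es.length : Int) 1).foldl (fun amt s =>
        if PySem.List.pyGetD ds s 0 ≥ u0
        then amt + PySem.Int.floordiv (PySem.List.pyGetD es s 0 * (100 - PySem.List.pyGetD ds s 0)) 100
        else amt) a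
      = a + (((es.zip ds).filter (fun p => p.2 ≥ u0)).map
          (fun p => PySem.Int.floordiv (p.1 * (100 - p.2)) 100)).sum := by
  have hz : (es.zip ds).length = es.length := by simp [hlen]
  have key := PySem.List.foldl_pyRange_zero_pyGetD' (es.zip ds) ((0 : Int), (0 : Int))
      (fun amt p => if p.2 ≥ u0 then amt + PySem.Int.floordiv (p.1 * (100 - p.2)) 100 else amt) a
  rw [hz] at key
  have hcongr : (PySem.List.pyRange 0 (es.length : Int) 1).foldl (fun amt s =>
        if PySem.List.pyGetD ds s 0 ≥ u0
        then amt + PySem.Int.floordiv (PySem.List.pyGetD es s 0 * (100 - PySem.List.pyGetD ds s 0)) 100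
        else amt) a
      = (PySem.List.pyRange 0 (es.length : Int) 1).foldl (fun amt s =>
          (fun amt (p : Int × Int) => if p.2 ≥ u0 then amt + PySem.Int.floordiv (p.1 * (100 - p.2)) 100 else amt)
            amt (PySem.List.pyGetD (es.zip ds) s ((0 : Int), (0 : Int)))) a := by
    refine PySem.List.foldl_congr_mem _ _ _ _ (fun acc s hs => ?_)
    rw [PySem.List.mem_pyRange_one] at hs
    rw [pyGetD_zip es ds s hs.1 hs.2 (by omega)]
  rw [hcongr, key]
  exact foldl_if_add_eq_sum _ _ _ a

-- leaf of A's dfs on a full assignment = B's score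
theorem leaf_eq (users : List (List Int)) (emoticons combo : List Int)
    (hlen : combo.length = emoticons.length) :
    leafA users emoticons emoticons.length combo = scoreB users emoticons combo := by
  unfold leafA scoreB
  refine PySem.List.foldl_congr_mem _ _ _ _ (fun acc user _ => ?_)
  rw [inner_eq emoticons combo hlen (PySem.List.pyGetD user 0 0) 0, zero_add]

-- every combination produced has full length
theorem combosB_length (k : Nat) : ∀ c ∈ combosB k, c.length = k := by
  induction k with
  | zero => intro c hc; simp [combosB] at hc; simp [hc]
  | succ k ih =>
      intro c hc
      simp only [combosB, List.mem_flatMap, List.mem_map] at hc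
      obtain ⟨j, _, c', hc', rfl⟩ := hc
      simp [ih c' hc']

theorem take_set_succ {α : Type} (xs : List α) (i : Nat) (v : α) (h : i < xs.length) :
    (xs.set i v).take (i + 1) = xs.take i ++ [v] := by
  induction xs generalizing i with
  | nil => simp at h
  | cons x xs ih =>
      cases i with
      | zero => simp
      | succ i => simp [List.set_cons_succ, List.take_succ_cons, ih i (by simpa using h)]

-- A's dfs from depth k over an arbitrary sale buffer = fold of updA over all combinations
theorem dfsA_eq (users : List (List Int)) (emoticons : List Int) (m : Nat) :
    ∀ (k : Nat) (sale : List Int) (ans : Int × Int), sale.length = m → k ≤ m →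
      dfsA users emoticons m k sale ans
        = (combosB k).foldl (fun a c => updA a (leafA users emoticons m (sale.take (m - k) ++ c))) ans := by
  intro k
  induction k with
  | zero =>
      intro sale ans hlen _
      simp only [dfsA, combosB, List.foldl_cons, List.foldl_nil, Nat.sub_zero, ← hlen, List.take_length, List.append_nil]
  | succ k ih =>
      intro sale ans hlen hk
      have hi : m - (k + 1) < m := by omega
      simp only [dfsA, combosB, foldl_flatMap', List.foldl_map]
      refine PySem.List.foldl_congr_mem _ _ _ _ (fun a j _ => ?_)
      rw [ih _ a (by simp [PySem.List.pySetD_natCast, hlen]) (by omega)]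
      refine PySem.List.foldl_congr_mem _ _ _ _ (fun a' c _ => ?_)
      have hstep : (PySem.List.pySetD sale ((m - (k + 1) : Nat) : Int) j).take (m - k)
          = sale.take (m - (k + 1)) ++ [j] := by
        rw [PySem.List.pySetD_natCast]
        have : m - k = (m - (k + 1)) + 1 := by omega
        rw [this, take_set_succ sale _ j (by omega)]
      rw [hstep, List.append_assoc]
      rfl

-- ===== VERDICT (by name: the statement is the Claim_ definition above) =====
theorem solution_spec : Claim_equal_solution := by
  intro users emoticons _ _
  unfold Spec_solution solution solution_alt
  dsimp only
  rw [dfsA_eq users emoticons emoticons.length emoticons.length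
        (List.replicate emoticons.length (10 : Int)) (0, 0) (by simp) le_rfl]
  simp only [Nat.sub_self, List.take_zero, List.nil_append]
  have : (combosB emoticons.length).foldl
          (fun a c => updA a (leafA users emoticons emoticons.length c)) (0, 0)
      = (combosB emoticons.length).foldl (fun b c =>
          let sc := scoreB users emoticons c
          if sc.1 > b.1 ∨ (sc.1 = b.1 ∧ sc.2 > b.2) then sc else b) (0, 0) := by
    refine PySem.List.foldl_congr_mem _ _ _ _ (fun a c hc => ?_)
    rw [leaf_eq users emoticons c (combosB_length _ c hc), updA_eq]
  rw [this]
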